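-- pv_equiv track=rewrite | github.com/hduyanh/python-codes | tanulas/egyetemi_beadandok.py | gizda_e
-- ===== SOURCE A (Python) =====
-- def gizda_e(n, m):
--   s1 = str(n)
--   s2 = str(m)
-- # ahányadik helyen áll a számjegy az eredeti számban
--   hely = 0
--   for i in s1:
--     hely += 1
--     if i == s2:
--       break
-- # számjegyek kétszeresét fölemeljük a kétszeresére annak a számnak
--   l1 = []
--   for j in s1:
--     l1.append((2*int(j)) * (2* hely))
-- # ezeknek a hatványoknak az összege
--   osszeg = 0
--   for x in l1:
--     osszeg += x
-- # egyenlő az eredeti számmal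
--   return osszeg == n
-- ===== SOURCE B (Python) =====
-- def gizda_e(n, m):
--     # Pure-arithmetic version: no string conversion at all.  Digits of n are
--     # extracted by recursive divmod; the first-match position of digit m uses
--     # list.index, defaulting to the digit count; the check is the closed form
--     # 4 * position * digitsum(n) == n.
--     def digs(k):
--         return digs(k // 10) + [k % 10] if k >= 10 else [k]
--     ds = digs(n)
--     hely = ds.index(m) + 1 if 0 <= m <= 9 and m in ds else len(ds)
--     return 4 * hely * sum(ds) == n
-- ===== Notes on version B (the rewrite author's own statement) =====
-- stated objective: alternative
-- what changed: B drops the string representation entirely: it extracts the digits of n by a recursive divmod helper, finds the match position with list.index defaulting to the digit count, and tests the closed form 4*pos*digitsum(n) == n, instead of A's char-by-char scan over str(n) plus a product-list loop and a summing loop.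
import Mathlib
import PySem

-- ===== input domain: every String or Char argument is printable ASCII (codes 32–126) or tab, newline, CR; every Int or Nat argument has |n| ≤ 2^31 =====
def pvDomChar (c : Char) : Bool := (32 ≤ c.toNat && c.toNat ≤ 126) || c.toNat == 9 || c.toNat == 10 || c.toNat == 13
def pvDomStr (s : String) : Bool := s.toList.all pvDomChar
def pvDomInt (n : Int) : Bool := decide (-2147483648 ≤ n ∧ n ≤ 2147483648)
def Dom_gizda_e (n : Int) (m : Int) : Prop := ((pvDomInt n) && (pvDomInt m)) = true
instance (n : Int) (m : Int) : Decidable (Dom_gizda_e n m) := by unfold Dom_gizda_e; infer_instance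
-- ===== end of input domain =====

-- B is a string-free re-implementation: digits of n are obtained by a recursive
-- divmod instead of str(n), the match position by list.index instead of a
-- scan-with-break, and the result is the closed form 4*pos*digitsum(n) == n.
-- Objective: simpler (no string conversions, one recursive helper).

-- ===== PORT A =====
-- int(j) for a single char; Python raises on a non-digit char ('-' of a negative n),
-- which Pre_ excludes, so the getD 0 default is never reached inside Pre_.
def pvDigit (j : Char) : Int := (PySem.Int.ofStr? (String.mk [j])).getD 0

-- A's first loop: hely starts at 0, +1 each step, break when the char equals s2.
def pvHelyA : List Char → List Char → Int → Int
  | [], _, hely => hely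
  | i :: rest, s2, hely =>
      if [i] = s2 then hely + 1 else pvHelyA rest s2 (hely + 1)

def gizda_e (n : Int) (m : Int) : Bool :=
  let s1 := (PySem.Int.toStr n).toList
  let s2 := (PySem.Int.toStr m).toList
  let hely := pvHelyA s1 s2 0
  let l1 := s1.foldl (fun acc j => acc ++ [(2 * pvDigit j) * (2 * hely)]) []
  let osszeg := l1.foldl (fun a x => a + x) 0
  osszeg == n

-- ===== PORT B =====
-- Source B's recursive digit extraction: digs(k) = digs(k // 10) + [k % 10] if k >= 10 else [k]
def pvDigits (k : Int) : List Int :=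
  if h : 10 ≤ k then pvDigits (PySem.Int.floordiv k 10) ++ [PySem.Int.mod k 10] else [k]
  termination_by k.toNat
  decreasing_by
    simp only [PySem.Int.floordiv]
    rw [Int.fdiv_eq_ediv_of_nonneg _ (by omega)]
    omega

def gizda_e_alt (n : Int) (m : Int) : Bool :=
  let ds := pvDigits n
  let hely : Int :=
    if 0 ≤ m ∧ m ≤ 9 ∧ m ∈ ds then (((PySem.List.index? ds m).getD 0 : Nat) : Int) + 1
    else (ds.length : Int)
  4 * hely * ds.sum == n

-- ===== PRECONDITION & SPEC =====
-- Pre_ excludes n < 0, where the Python A raises ValueError at int('-').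
def Pre_gizda_e (n : Int) (m : Int) : Prop := 0 ≤ n
instance (n : Int) (m : Int) : Decidable (Pre_gizda_e n m) := by unfold Pre_gizda_e; infer_instance
def pvWitness_gizda_e : Int × Int := (12, 1)

def Spec_gizda_e (n : Int) (m : Int) (out : Bool) : Prop := out = gizda_e_alt n m
instance (n : Int) (m : Int) (out : Bool) : Decidable (Spec_gizda_e n m out) := by unfold Spec_gizda_e; infer_instance

-- ===== CLAIM (what is proved, stated in full; the proofs are below) =====
def Claim_equal_gizda_e : Prop := ∀ (n : Int) (m : Int), Dom_gizda_e n m → Pre_gizda_e n m → Spec_gizda_e n m (gizda_e n m)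

-- ===== LEMMAS AND PROOFS =====

-- `Nat.toDigitsCore` with sufficient fuel is `Nat.toDigits` followed by the accumulator.
theorem toDigitsCore_eq (n : Nat) : ∀ (f : Nat) (acc : List Char), n < f →
    Nat.toDigitsCore 10 f n acc = Nat.toDigits 10 n ++ acc := by
  induction n using Nat.strong_induction_on with
  | _ n ih =>
    intro f acc hf
    match f, hf with
    | f + 1, _ =>
      by_cases h10 : n < 10
      · simp [Nat.toDigitsCore, Nat.toDigits, Nat.div_eq_of_lt h10]
      · have hdivlt : n / 10 < n := Nat.div_lt_self (by omega) (by norm_num)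
        rw [show Nat.toDigitsCore 10 (f + 1) n acc
              = Nat.toDigitsCore 10 f (n / 10) ((n % 10).digitChar :: acc) by
            simp [Nat.toDigitsCore]; omega,
          ih (n / 10) hdivlt f _ (by omega)]
        rw [show Nat.toDigits 10 n
              = Nat.toDigitsCore 10 n (n / 10) [(n % 10).digitChar] by
            simp [Nat.toDigits, Nat.toDigitsCore]; omega,
          ih (n / 10) hdivlt n _ (by omega)]
        simp

theorem pvDigit_digitChar : ∀ d, d < 10 → pvDigit (Nat.digitChar d) = (d : Int) := by decide

theorem digitChar_inj : ∀ a, a < 10 → ∀ b, b < 10 →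
    (Nat.digitChar a = Nat.digitChar b ↔ a = b) := by decide

-- the map of pvDigit over str(k)'s characters is B's arithmetic digit list
theorem map_toDigits (k : Nat) :
    (Nat.toDigits 10 k).map pvDigit = pvDigits (k : Int) := by
  induction k using Nat.strong_induction_on with
  | _ k ih =>
    by_cases h10 : k < 10
    · rw [show Nat.toDigits 10 k = [(k % 10).digitChar] by
        simp [Nat.toDigits, Nat.toDigitsCore, Nat.div_eq_of_lt h10],
        pvDigits.eq_def, dif_neg (show ¬ (10 : Int) ≤ (k : Int) by omega)]
      simp [Nat.mod_eq_of_lt h10, pvDigit_digitChar k h10]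
    · have hdivlt : k / 10 < k := Nat.div_lt_self (by omega) (by norm_num)
      rw [show Nat.toDigits 10 k
            = Nat.toDigitsCore 10 k (k / 10) [(k % 10).digitChar] by
          simp [Nat.toDigits, Nat.toDigitsCore]; omega,
        toDigitsCore_eq (k / 10) k _ (by omega)]
      rw [pvDigits.eq_def]
      simp only [show (10 : Int) ≤ (k : Int) by omega, dite_true, List.map_append,
        ih (k / 10) hdivlt, List.map_cons, List.map_nil]
      have hfd : PySem.Int.floordiv (k : Int) 10 = ((k / 10 : Nat) : Int) := by
        simp only [PySem.Int.floordiv, Int.fdiv_eq_ediv_of_nonneg _ (by norm_num : (0:Int) ≤ 10)]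
        omega
      have hmd : PySem.Int.mod (k : Int) 10 = ((k % 10 : Nat) : Int) := by
        simp only [PySem.Int.mod, Int.fmod_eq_emod]
        simp only [if_pos (Or.inl (by norm_num : (0:Int) ≤ 10))]
        omega
      rw [hfd, hmd, pvDigit_digitChar (k % 10) (Nat.mod_lt _ (by norm_num))]

-- every character of str(k) is a digit character
theorem toDigits_digits (k : Nat) :
    ∀ c ∈ Nat.toDigits 10 k, ∃ d, d < 10 ∧ c = Nat.digitChar d := by
  induction k using Nat.strong_induction_on with
  | _ k ih =>
    by_cases h10 : k < 10
    · rw [show Nat.toDigits 10 k = [(k % 10).digitChar] by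
        simp [Nat.toDigits, Nat.toDigitsCore, Nat.div_eq_of_lt h10]]
      intro c hc
      exact ⟨k % 10, Nat.mod_lt _ (by norm_num), by simpa using hc⟩
    · have hdivlt : k / 10 < k := Nat.div_lt_self (by omega) (by norm_num)
      rw [show Nat.toDigits 10 k
            = Nat.toDigitsCore 10 k (k / 10) [(k % 10).digitChar] by
          simp [Nat.toDigits, Nat.toDigitsCore]; omega,
        toDigitsCore_eq (k / 10) k _ (by omega)]
      intro c hc
      rcases List.mem_append.1 hc with h | h
      · exact ih (k / 10) hdivlt c h
      · exact ⟨k % 10, Nat.mod_lt _ (by norm_num), by simpa using h⟩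

theorem pvDigits_length_pos (k : Int) : 1 ≤ (pvDigits k).length := by
  rw [pvDigits.eq_def]; split <;> simp

theorem toDigits_length_eq (k : Nat) :
    (Nat.toDigits 10 k).length = (pvDigits (k : Int)).length := by
  rw [← map_toDigits, List.length_map]

-- A's scan when the target string cannot match any single character
theorem pvHelyA_no_match (s2 : List Char) (H : 2 ≤ s2.length) :
    ∀ (l : List Char) (h : Int), pvHelyA l s2 h = h + l.length := by
  intro l
  induction l with
  | nil => intro h; simp [pvHelyA]
  | cons c rest ihl =>
    intro h
    rw [pvHelyA, if_neg (by intro he; rw [← he] at H; simp at H), ihl]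
    simp; ring

-- A's scan over digit characters, against a single digit character, is a first-index lookup
theorem pvHelyA_digit (d : Nat) (hd : d < 10) :
    ∀ (l : List Char), (∀ c ∈ l, ∃ e, e < 10 ∧ c = Nat.digitChar e) → ∀ (h : Int),
    pvHelyA l [Nat.digitChar d] h =
      match PySem.List.index? (l.map pvDigit) (d : Int) with
      | some i => h + i + 1
      | none => h + l.length := by
  intro l
  induction l with
  | nil => intro _ h; simp [pvHelyA, PySem.List.index?]
  | cons c rest ihl =>
    intro hdig h
    obtain ⟨e, he, rfl⟩ := hdig c (List.mem_cons_self ..)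
    by_cases heq : e = d
    · subst heq
      rw [pvHelyA, if_pos rfl, List.map_cons, pvDigit_digitChar e he,
        PySem.List.index?_cons_self]
      simp
    · have hne : Nat.digitChar e ≠ Nat.digitChar d := by
        intro hc; exact heq ((digitChar_inj e he d hd).1 hc)
      have hne' : pvDigit (Nat.digitChar e) ≠ (d : Int) := by
        rw [pvDigit_digitChar e he]; omega
      rw [pvHelyA, if_neg (by simpa using hne)]
      rw [ihl (fun c hc => hdig c (List.mem_cons_of_mem _ hc)) (h + 1)]
      rw [List.map_cons, PySem.List.index?_cons_of_ne]
      · cases hidx : PySem.List.index? (rest.map pvDigit) (d : Int) with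
        | none => simp; ring
        | some i => simp; ring
      · exact hne'

-- A's second and third loops: the accumulated sum is the closed form
theorem foldl_append_map (f : Char → Int) (s : List Char) (acc : List Int) :
    s.foldl (fun a j => a ++ [f j]) acc = acc ++ s.map f := by
  induction s generalizing acc with
  | nil => simp
  | cons c rest ih => simp [List.foldl, ih]

theorem foldl_add_int (l : List Int) (s : Int) :
    l.foldl (fun a x => a + x) s = s + l.sum := by
  induction l generalizing s with
  | nil => simp
  | cons x rest ih => simp [List.foldl, ih]; ring

theorem sum_map_factor (h : Int) (s : List Char) :
    (s.map (fun j => (2 * pvDigit j) * (2 * h))).sum = 4 * h * (s.map pvDigit).sum := by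
  induction s with
  | nil => simp
  | cons c rest ih => simp [ih]; ring

-- membership transfer: digit m occurs in B's digit list iff its character occurs in str(n)
theorem index?_map_mem {l : List Char} {d : Int} :
    d ∈ l.map pvDigit ↔ PySem.List.index? (l.map pvDigit) d ≠ none := by
  rw [Ne, PySem.List.index?_eq_none_iff]; simp

-- ===== VERDICT (by name: the statement is the Claim_ definition above) =====
theorem gizda_e_spec : Claim_equal_gizda_e := by
  intro n m _ hn
  have hn0 : (0 : Int) ≤ n := hn
  unfold Spec_gizda_e gizda_e gizda_e_alt
  simp only [PySem.Int.toList_toStr, PySem.Int.toChars]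
  rw [if_neg (by omega : ¬ n < 0)]
  have hmap : (Nat.toDigits 10 n.toNat).map pvDigit = pvDigits n := by
    rw [map_toDigits, Int.toNat_of_nonneg hn0]
  -- the sums
  rw [foldl_append_map, foldl_add_int]
  simp only [List.nil_append, zero_add, sum_map_factor, hmap]
  -- the positions
  have hhely : pvHelyA (Nat.toDigits 10 n.toNat)
      (if m < 0 then '-' :: Nat.toDigits 10 m.natAbs else Nat.toDigits 10 m.toNat) 0 =
      (if 0 ≤ m ∧ m ≤ 9 ∧ m ∈ pvDigits n
       then (((PySem.List.index? (pvDigits n) m).getD 0 : Nat) : Int) + 1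
       else ((pvDigits n).length : Int)) := by
    rw [show (if m < 0 then '-' :: Nat.toDigits 10 m.natAbs else Nat.toDigits 10 m.toNat)
        = PySem.Int.toChars m from rfl]
    by_cases hm : 0 ≤ m ∧ m ≤ 9
    · have hm10 : m.toNat < 10 := by omega
      have hs2 : PySem.Int.toChars m = [Nat.digitChar m.toNat] := by
        simp [PySem.Int.toChars, show ¬ m < 0 by omega, Nat.toDigits, Nat.toDigitsCore,
          Nat.div_eq_of_lt hm10, Nat.mod_eq_of_lt hm10]
      rw [hs2, pvHelyA_digit m.toNat hm10 _ (toDigits_digits n.toNat) 0]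
      have hmcast : ((m.toNat : Nat) : Int) = m := by omega
      rw [hmap, hmcast]
      by_cases hmem : m ∈ pvDigits n
      · rw [if_pos ⟨hm.1, hm.2, hmem⟩]
        obtain ⟨i, hi⟩ := Option.ne_none_iff_exists'.1
          (index?_map_mem.1 (by rw [hmap]; exact hmem))
        rw [hmap] at hi
        rw [hi]; simp
      · rw [if_neg (by tauto), (PySem.List.index?_eq_none_iff _ _).2 hmem]
        have hlen := toDigits_length_eq n.toNat
        rw [Int.toNat_of_nonneg hn0] at hlen
        simp [hlen]
    · rw [if_neg (by tauto)]
      have hlen2 : 2 ≤ (PySem.Int.toChars m).length := by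
        by_cases hneg : m < 0
        · simp only [PySem.Int.toChars, if_pos hneg, List.length_cons]
          have h1 := toDigits_length_eq m.natAbs
          have h2 := pvDigits_length_pos ((m.natAbs : Nat) : Int)
          omega
        · have hm10 : 10 ≤ m.toNat := by omega
          have hdivlt : m.toNat / 10 < m.toNat := Nat.div_lt_self (by omega) (by norm_num)
          simp only [PySem.Int.toChars, if_neg hneg]
          rw [show Nat.toDigits 10 m.toNat
                = Nat.toDigitsCore 10 m.toNat (m.toNat / 10) [(m.toNat % 10).digitChar] by
              simp [Nat.toDigits, Nat.toDigitsCore]; omega,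
            toDigitsCore_eq (m.toNat / 10) m.toNat _ (by omega)]
          have h1 := toDigits_length_eq (m.toNat / 10)
          have h2 := pvDigits_length_pos ((m.toNat / 10 : Nat) : Int)
          rw [List.length_append]
          simp only [List.length_cons, List.length_nil]
          omega
      rw [pvHelyA_no_match _ hlen2]
      have := toDigits_length_eq n.toNat
      rw [Int.toNat_of_nonneg hn0] at this
      simp [this]
  rw [hhely]
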